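-- pv_equiv track=rewrite | github.com/samf/devmates | 2019-11-12/2019-11-12.py | solve
-- ===== SOURCE A (Python) =====
-- def solve(occur):
--     rc = 0
--     done = False
--
--     while not done:
--         for i, left, right in zip(range(len(occur)), occur, occur[1:]):
--             if left == 0:
--                 continue
--             if left == right:
--                 occur[i] -= 1
--                 rc += 1
--                 break
--         else:
--             done = True
--
--     return rc
-- ===== SOURCE B (Python) =====
-- def solve(occur):
--     # One right-to-left pass: each element's settled value follows from its
--     # right neighbor's starting and settled values; sum all decrements.
--     total = 0
--     orig = final = None
--     for v in reversed(occur):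
--         f = v
--         if orig is not None and v != 0 and final <= v <= orig:
--             # v meets the descending neighbor and ends one below its rest value,
--             # except that a positive count freezes when it reaches zero
--             f = final - 1
--             if v > 0 and f < 0:
--                 f = 0
--         total += v - f
--         orig, final = v, f
--     return total
-- ===== Notes on version B (the rewrite author's own statement) =====
-- stated objective: faster
-- what changed: Replaces the restart-the-scan-after-each-single-decrement fixpoint loop with one right-to-left pass that computes each element's settled value from its right neighbor's starting and settled values, summing the decrements.
import Mathlib
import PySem

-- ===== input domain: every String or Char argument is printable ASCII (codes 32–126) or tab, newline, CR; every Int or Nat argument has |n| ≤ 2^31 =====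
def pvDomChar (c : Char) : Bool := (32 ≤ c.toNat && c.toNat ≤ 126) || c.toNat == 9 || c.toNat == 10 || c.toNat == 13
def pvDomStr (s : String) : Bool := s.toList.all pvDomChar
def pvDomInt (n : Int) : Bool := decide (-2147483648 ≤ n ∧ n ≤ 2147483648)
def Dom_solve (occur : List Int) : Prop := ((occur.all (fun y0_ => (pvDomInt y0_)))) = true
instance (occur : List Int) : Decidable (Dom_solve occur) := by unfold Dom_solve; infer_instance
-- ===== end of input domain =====

-- B replaces A's restart-after-each-decrement fixpoint loop by one right-to-left
-- pass computing each settled value directly (objective: faster).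
-- Python A mutates `occur` in place; the equivalence proved here is about the
-- RETURN value only (B does not mutate).

-- ===== PORT A =====
-- helper: A's inner `for … zip(range, occur, occur[1:]) … break/else`,
-- returning the index at which the break fires (None = the else branch).
def solveScan : List Int → Nat → Option Nat
  | l :: r :: rest, i =>
    if l = 0 then solveScan (r :: rest) (i + 1)
    else if l = r then some i
    else solveScan (r :: rest) (i + 1)
  | _, _ => none

-- Source B's settled-value formula (also reused, via `finals`, as A's termination measure)
def fstep (v o f : Int) : Int :=
  if v ≠ 0 ∧ f ≤ v ∧ v ≤ o then (if 0 < v ∧ f - 1 < 0 then 0 else f - 1) else v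

-- settled values of the array (proof/termination helper, right-to-left recurrence)
def finals : List Int → List Int
  | [] => []
  | [v] => [v]
  | v :: r :: rest => fstep v r ((finals (r :: rest)).headI) :: finals (r :: rest)

-- total number of decrements still to happen (termination measure for A's while loop)
def rem (a : List Int) : Nat :=
  ((a.zip (finals a)).map (fun p => (p.1 - p.2).toNat)).sum

theorem fstep_le (v o f : Int) : fstep v o f ≤ v := by
  unfold fstep; split_ifs <;> omega

theorem fstep_lt (v o f : Int) (hv : v ≠ 0) (hf : f ≤ v) (ho : v ≤ o) :
    fstep v o f ≤ v - 1 := by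
  unfold fstep; split_ifs <;> omega

theorem finals_headI_le (v : Int) (rest : List Int) :
    ((finals (v :: rest)).headI) ≤ v := by
  cases rest with
  | nil => simp [finals]
  | cons r rs => simpa [finals] using fstep_le v r ((finals (r :: rs)).headI)

theorem finals_cons (v : Int) (t : List Int) (ht : t ≠ []) :
    finals (v :: t) = fstep v t.headI (finals t).headI :: finals t := by
  cases t with
  | nil => exact absurd rfl ht
  | cons r rs => simp [finals]

theorem rem_cons (v : Int) (t : List Int) (ht : t ≠ []) :
    rem (v :: t) = (v - fstep v t.headI (finals t).headI).toNat + rem t := by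
  rw [rem, finals_cons v t ht]; simp [rem]

theorem scan_shift : ∀ (xs : List Int) (i : Nat),
    solveScan xs (i + 1) = (solveScan xs i).map (· + 1) := by
  intro xs
  induction xs with
  | nil => intro i; simp [solveScan]
  | cons l tl ih =>
    intro i
    cases tl with
    | nil => simp [solveScan]
    | cons r rs =>
      simp only [solveScan]
      split_ifs <;> simp [ih]

theorem fstep_dec_eq (v f : Int) (hv : v ≠ 0) (hf : f ≤ v) :
    fstep (v - 1) v f = fstep v v f := by
  unfold fstep; split_ifs <;> omega

theorem fstep_o_dec (v o f : Int) (hne : v = 0 ∨ v ≠ o) (_hfle : f ≤ o - 1) :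
    fstep v (o - 1) f = fstep v o f := by
  unfold fstep; split_ifs <;> omega

theorem scan_some_zero (r : Int) (rest : List Int)
    (h : solveScan (r :: rest) 0 = some 0) :
    r ≠ 0 ∧ rest ≠ [] ∧ r = rest.headI := by
  cases rest with
  | nil => simp [solveScan] at h
  | cons o2 rs =>
    simp only [solveScan] at h
    split_ifs at h with h1 h2
    · rw [show (0:Nat)+1 = 0+1 from rfl, scan_shift] at h
      cases hs : solveScan (o2 :: rs) 0 <;> simp [hs] at h
    · exact ⟨h1, by simp, h2⟩
    · rw [show (0:Nat)+1 = 0+1 from rfl, scan_shift] at h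
      cases hs : solveScan (o2 :: rs) 0 <;> simp [hs] at h

-- lifting one settled step from the tail to the whole list
theorem step_cons_of_tail (v r : Int) (rs : List Int) (j : Nat)
    (hs : solveScan (r :: rs) 0 = some j) (hv : v = 0 ∨ v ≠ r)
    (ih : finals ((r :: rs).set j ((r :: rs).getD j 0 - 1)) = finals (r :: rs) ∧
      rem ((r :: rs).set j ((r :: rs).getD j 0 - 1)) + 1 = rem (r :: rs)) :
    finals ((v :: r :: rs).set (j + 1) ((v :: r :: rs).getD (j + 1) 0 - 1))
      = finals (v :: r :: rs) ∧
    rem ((v :: r :: rs).set (j + 1) ((v :: r :: rs).getD (j + 1) 0 - 1)) + 1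
      = rem (v :: r :: rs) := by
  obtain ⟨hf, hr⟩ := ih
  have hne : (r :: rs) ≠ ([] : List Int) := by simp
  set t' := (r :: rs).set j ((r :: rs).getD j 0 - 1) with ht'
  have hset : (v :: r :: rs).set (j + 1) ((v :: r :: rs).getD (j + 1) 0 - 1)
      = v :: t' := by simp [ht']
  have hne' : t' ≠ ([] : List Int) := by
    intro hc
    have := congrArg List.length hc
    simp [ht'] at this
  have hhead : fstep v t'.headI (finals t').headI
      = fstep v r (finals (r :: rs)).headI := by
    rw [hf]
    cases j with
    | zero =>
      obtain ⟨hr0, hrsne, hrh⟩ := scan_some_zero r rs hs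
      have hle1 : (finals (r :: rs)).headI ≤ r - 1 := by
        cases rs with
        | nil => exact absurd rfl hrsne
        | cons o2 rs2 =>
          have h2le : (finals (o2 :: rs2)).headI ≤ o2 := finals_headI_le o2 rs2
          simp only [List.headI] at hrh
          have := fstep_lt r o2 (finals (o2 :: rs2)).headI hr0 (hrh ▸ h2le)
            (le_of_eq hrh)
          simpa [finals] using this
      have : t'.headI = r - 1 := by simp [ht']
      rw [this]
      exact fstep_o_dec v r (finals (r :: rs)).headI hv hle1
    | succ k =>
      have : t'.headI = r := by simp [ht']
      rw [this]
  constructor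
  · rw [hset, finals_cons _ _ hne', finals_cons _ _ hne, hhead, hf]
    rw [List.headI_cons]
  · rw [hset, rem_cons _ _ hne', rem_cons _ _ hne, hhead]
    rw [List.headI_cons]
    omega

-- KEY: one step of A's loop (decrement at the index solveScan finds) keeps the
-- settled values unchanged and reduces the remaining-decrements measure by one.
theorem rem_step : ∀ (a : List Int) (i : Nat), solveScan a 0 = some i →
    finals (a.set i (a.getD i 0 - 1)) = finals a ∧
      rem (a.set i (a.getD i 0 - 1)) + 1 = rem a := by
  intro a
  induction a with
  | nil => intro i h; simp [solveScan] at h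
  | cons v tl ih =>
    intro i h
    cases tl with
    | nil => simp [solveScan] at h
    | cons r rs =>
      have hne : (r :: rs) ≠ ([] : List Int) := by simp
      have hle : (finals (r :: rs)).headI ≤ r := finals_headI_le r rs
      simp only [solveScan] at h
      split_ifs at h with h1 h2
      · -- v = 0, recurse
        rw [show (0:Nat)+1 = 0+1 from rfl, scan_shift] at h
        cases hs : solveScan (r :: rs) 0 with
        | none => simp [hs] at h
        | some j =>
          rw [hs] at h; simp at h
          subst h
          exact step_cons_of_tail v r rs j hs (Or.inl h1) (ih j hs)
      · -- v ≠ 0, v = r : i = 0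
        simp at h
        subst h
        simp only [List.set_cons_zero, List.getD_cons_zero]
        have hcv : fstep (v - 1) r (finals (r :: rs)).headI
            = fstep v r (finals (r :: rs)).headI := by
          rw [← h2]; exact fstep_dec_eq v _ h1 (h2 ▸ hle)
        have hlt : fstep v r (finals (r :: rs)).headI ≤ v - 1 :=
          fstep_lt _ _ _ h1 (h2 ▸ hle) (le_of_eq h2)
        constructor
        · rw [finals_cons _ _ hne, finals_cons _ _ hne]
          rw [List.headI_cons]
          rw [hcv]
        · rw [rem_cons _ _ hne, rem_cons _ _ hne]
          rw [List.headI_cons]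
          rw [hcv]
          omega
      · -- v ≠ 0, v ≠ r, recurse
        rw [show (0:Nat)+1 = 0+1 from rfl, scan_shift] at h
        cases hs : solveScan (r :: rs) 0 with
        | none => simp [hs] at h
        | some j =>
          rw [hs] at h; simp at h
          subst h
          exact step_cons_of_tail v r rs j hs (Or.inr h2) (ih j hs)

theorem rem_dec (a : List Int) (i : Nat) (h : solveScan a 0 = some i) :
    rem (a.set i (a.getD i 0 - 1)) < rem a := by
  have := (rem_step a i h).2; omega

-- the `while not done` loop of A
def solveLoop (occur : List Int) (rc : Int) : Int :=
  match h : solveScan occur 0 with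
  | some i => solveLoop (occur.set i (occur.getD i 0 - 1)) (rc + 1)
  | none => rc
termination_by rem occur
decreasing_by exact rem_dec occur i h

def solve (occur : List Int) : Int := solveLoop occur 0

-- ===== PORT B =====
-- Source B's loop over reversed(occur) with state (total, (orig, final) of the
-- right neighbor); the inline settled-value computation is `fstep`.
def solve_alt (occur : List Int) : Int :=
  (occur.reverse.foldl
    (fun (st : Int × Option (Int × Int)) v =>
      let f : Int :=
        match st.2 with
        | none => v
        | some (o, fn) => fstep v o fn
      (st.1 + (v - f), some (v, f)))
    (0, none)).1

-- ===== PRECONDITION & SPEC =====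
def Spec_solve (occur : List Int) (out : Int) : Prop := out = solve_alt occur
instance (occur : List Int) (out : Int) : Decidable (Spec_solve occur out) := by unfold Spec_solve; infer_instance

-- ===== CLAIM (what is proved, stated in full; the proofs are below) =====
def Claim_equal_solve : Prop := ∀ (occur : List Int), Dom_solve occur → Spec_solve occur (solve occur)

-- ===== LEMMAS AND PROOFS =====

theorem rem_single (v : Int) : rem [v] = 0 := by simp [rem, finals]

theorem scan_none_finals : ∀ (a : List Int), solveScan a 0 = none → finals a = a := by
  intro a
  induction a with
  | nil => intro _; rfl
  | cons v tl ih =>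
    intro h
    cases tl with
    | nil => rfl
    | cons r rs =>
      simp only [solveScan] at h
      have tail_none : ∀ xs : List Int,
          solveScan xs (0 + 1) = none → solveScan xs 0 = none := by
        intro xs hx
        rw [scan_shift] at hx
        cases hs : solveScan xs 0
        · rfl
        · rw [hs] at hx; simp at hx
      have key : (v = 0 ∨ v ≠ r) ∧ solveScan (r :: rs) 0 = none := by
        by_cases h1 : v = 0
        · rw [if_pos h1] at h
          exact ⟨Or.inl h1, tail_none _ h⟩
        · rw [if_neg h1] at h
          by_cases h2 : v = r
          · rw [if_pos h2] at h; simp at h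
          · rw [if_neg h2] at h
            exact ⟨Or.inr h2, tail_none _ h⟩
      obtain ⟨hnb, hrec⟩ := key
      have hf := ih hrec
      rw [finals_cons v _ (by simp), hf]
      simp only [List.headI_cons]
      have hfv : fstep v r r = v := by
        unfold fstep; split_ifs <;> omega
      rw [hfv]

theorem sum_zip_self : ∀ (l : List Int),
    (List.map (fun p : Int × Int => (p.1 - p.2).toNat) (l.zip l)).sum = 0 := by
  intro l
  induction l with
  | nil => rfl
  | cons v tl ih => simp [ih]

theorem rem_of_finals_eq (a : List Int) (h : finals a = a) : rem a = 0 := by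
  rw [rem, h]; exact sum_zip_self a

theorem solveLoop_eq (a : List Int) (rc : Int) : solveLoop a rc = rc + rem a := by
  induction a, rc using solveLoop.induct with
  | case1 a rc i h ih =>
    rw [solveLoop]
    split
    next i2 h2 =>
      have hii : i = i2 := by rw [h] at h2; exact Option.some.inj h2
      subst hii
      rw [ih]
      have := (rem_step a i h).2
      omega
    next h2 => rw [h] at h2; simp at h2
  | case2 a rc h =>
    rw [solveLoop]
    split
    next i2 h2 => rw [h] at h2; simp at h2
    next h2 =>
      rw [rem_of_finals_eq a (scan_none_finals a h)]
      simp

theorem solve_alt_fold : ∀ (a : List Int),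
    a.foldr (fun v (st : Int × Option (Int × Int)) =>
      let f : Int :=
        match st.2 with
        | none => v
        | some (o, fn) => fstep v o fn
      (st.1 + (v - f), some (v, f))) (0, none)
    = ((rem a : Int),
        match a with
        | [] => none
        | v :: _ => some (v, (finals a).headI)) := by
  intro a
  induction a with
  | nil => rfl
  | cons v tl ih =>
    cases tl with
    | nil => simp [rem_single, finals]
    | cons r rs =>
      simp only [List.foldr_cons, ih]
      have hle : 0 ≤ v - fstep v r (finals (r :: rs)).headI := by
        have := fstep_le v r (finals (r :: rs)).headI; omega
      rw [rem_cons v _ (by simp), finals_cons v _ (by simp)]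
      simp only [List.headI_cons]
      refine Prod.ext ?_ rfl
      push_cast [Int.toNat_of_nonneg hle]
      ring

theorem solve_alt_eq (a : List Int) : solve_alt a = rem a := by
  rw [solve_alt, List.foldl_reverse]
  rw [solve_alt_fold a]

-- ===== VERDICT (by name: the statement is the Claim_ definition above) =====
theorem solve_spec : Claim_equal_solve := by
  intro occur _
  unfold Spec_solve
  rw [solve, solveLoop_eq, solve_alt_eq]; simp
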